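-- pv_equiv track=rewrite | github.com/G33l0/redhunter | redhunter.py | _risk_level
-- ===== SOURCE A (Python) =====
-- def _risk_level(findings: dict) -> str:
--     crit = {"Database Credentials", "API Keys", "Cloud Credentials",
--             "Auth / JWT Secrets", "Passwords", "Private Keys/Certs"}
--     high = {"SMTP / Mail", "OAuth / SSO", "Stripe / Payment", "Twilio / SMS"}
--     if any(c in findings for c in crit):
--         return "CRITICAL"
--     if any(c in findings for c in high):
--         return "HIGH"
--     if findings:
--         return "MEDIUM"
--     return "LOW"
-- ===== SOURCE B (Python) =====
-- def _risk_level(findings: dict) -> str: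
--     crit = {"Database Credentials", "API Keys", "Cloud Credentials",
--             "Auth / JWT Secrets", "Passwords", "Private Keys/Certs"}
--     high = {"SMTP / Mail", "OAuth / SSO", "Stripe / Payment", "Twilio / SMS"}
--     score = 0
--     for k in findings:
--         score = max(score, 3 if k in crit else 2 if k in high else 1)
--     return {0: "LOW", 1: "MEDIUM", 2: "HIGH", 3: "CRITICAL"}[score]
-- ===== Notes on version B (the rewrite author's own statement) =====
-- stated objective: alternative
-- what changed: B makes one pass over the findings' keys taking a running maximum of a per-key numeric severity and maps the final score to a label, instead of A's ordered any()-scans over the two constant category sets.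
import Mathlib
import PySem

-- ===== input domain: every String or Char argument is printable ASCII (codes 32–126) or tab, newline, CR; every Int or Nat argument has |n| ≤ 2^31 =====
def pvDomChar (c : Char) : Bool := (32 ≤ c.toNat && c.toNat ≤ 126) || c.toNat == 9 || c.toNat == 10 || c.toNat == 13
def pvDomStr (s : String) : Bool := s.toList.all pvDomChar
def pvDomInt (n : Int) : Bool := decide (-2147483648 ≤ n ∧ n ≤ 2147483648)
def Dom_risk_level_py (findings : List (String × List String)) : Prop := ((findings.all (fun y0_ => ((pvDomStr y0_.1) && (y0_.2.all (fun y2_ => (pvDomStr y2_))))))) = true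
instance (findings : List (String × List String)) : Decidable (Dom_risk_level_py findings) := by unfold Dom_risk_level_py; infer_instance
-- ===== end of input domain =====

-- B replaces A's ordered any()-scans over the two constant sets by one pass over the
-- findings' keys keeping a running maximum severity, then maps the score to a label
-- (objective: alternative decomposition, same cost).

-- ===== PORT A =====
-- A's constant sets (distinct string literals; PySem.Set = list of distinct elements)
def pvCritA : List String :=
  ["Database Credentials", "API Keys", "Cloud Credentials",
   "Auth / JWT Secrets", "Passwords", "Private Keys/Certs"]
def pvHighA : List String :=
  ["SMTP / Mail", "OAuth / SSO", "Stripe / Payment", "Twilio / SMS"]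

-- literal port of A: any(c in findings for c in crit), then high, then truthiness of the dict
def risk_level_py (findings : List (String × List String)) : String :=
  if pvCritA.any (fun c => findings.any (fun kv => kv.1 == c)) then "CRITICAL"
  else if pvHighA.any (fun c => findings.any (fun kv => kv.1 == c)) then "HIGH"
  else if findings ≠ [] then "MEDIUM"
  else "LOW"

-- ===== PORT B =====
def pvCritB : List String :=
  ["Database Credentials", "API Keys", "Cloud Credentials",
   "Auth / JWT Secrets", "Passwords", "Private Keys/Certs"]
def pvHighB : List String :=
  ["SMTP / Mail", "OAuth / SSO", "Stripe / Payment", "Twilio / SMS"]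

-- '3 if k in crit else 2 if k in high else 1'
def pvSev (k : String) : Nat :=
  if pvCritB.contains k then 3 else if pvHighB.contains k then 2 else 1

-- literal port of B: running max over the keys, then the 4-entry lookup table
def risk_level_py_alt (findings : List (String × List String)) : String :=
  let score := findings.foldl (fun acc kv => max acc (pvSev kv.1)) 0
  if score = 0 then "LOW" else if score = 1 then "MEDIUM"
  else if score = 2 then "HIGH" else "CRITICAL"

-- ===== PRECONDITION & SPEC =====
def Spec_risk_level_py (findings : List (String × List String)) (out : String) : Prop := out = risk_level_py_alt findings
instance (findings : List (String × List String)) (out : String) : Decidable (Spec_risk_level_py findings out) := by unfold Spec_risk_level_py; infer_instance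

-- ===== CLAIM (what is proved, stated in full; the proofs are below) =====
def Claim_equal_risk_level_py : Prop := ∀ (findings : List (String × List String)), Dom_risk_level_py findings → Spec_risk_level_py findings (risk_level_py findings)

-- ===== LEMMAS AND PROOFS =====

def pvMax (xs : List (String × List String)) : Nat :=
  xs.foldl (fun acc kv => max acc (pvSev kv.1)) 0

theorem pvSev_bounds (k : String) : 1 ≤ pvSev k ∧ pvSev k ≤ 3 := by
  unfold pvSev; split_ifs <;> omega

theorem pvSev_eq3 (k : String) : pvSev k = 3 ↔ k ∈ pvCritA := by
  constructor
  · intro h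
    unfold pvSev at h
    split_ifs at h with h1 h2
    · exact List.mem_of_elem_eq_true h1
    · omega
    · omega
  · intro h
    fin_cases h <;> decide

theorem pvSev_eq2 (k : String) : pvSev k = 2 ↔ k ∈ pvHighA := by
  constructor
  · intro h
    unfold pvSev at h
    split_ifs at h with h1 h2
    · omega
    · exact List.mem_of_elem_eq_true h2
    · omega
  · intro h
    fin_cases h <;> decide

theorem pvFold_max (xs : List (String × List String)) (a : Nat) :
    xs.foldl (fun acc kv => max acc (pvSev kv.1)) a = max a (pvMax xs) := by
  induction xs generalizing a with
  | nil => simp [pvMax]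
  | cons hd tl ih =>
    simp only [pvMax, List.foldl_cons] at *
    rw [ih, ih (max 0 (pvSev hd.1))]
    omega

theorem pvMax_cons (hd : String × List String) (tl : List (String × List String)) :
    pvMax (hd :: tl) = max (pvSev hd.1) (pvMax tl) := by
  have h := pvFold_max tl (max 0 (pvSev hd.1))
  show List.foldl (fun acc kv => max acc (pvSev kv.1)) (max 0 (pvSev hd.1)) tl = _
  rw [h]
  omega

theorem pvMax_le (xs : List (String × List String)) : pvMax xs ≤ 3 := by
  induction xs with
  | nil => simp [pvMax]
  | cons hd tl ih =>
    rw [pvMax_cons]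
    have := pvSev_bounds hd.1
    omega

theorem pvMax_eq3 (xs : List (String × List String)) :
    pvMax xs = 3 ↔ ∃ kv ∈ xs, pvSev kv.1 = 3 := by
  induction xs with
  | nil => simp [pvMax]
  | cons hd tl ih =>
    rw [pvMax_cons]
    simp only [List.mem_cons]
    constructor
    · intro h
      have h1 := pvMax_le tl
      have h2 := pvSev_bounds hd.1
      by_cases hh : pvSev hd.1 = 3
      · exact ⟨hd, Or.inl rfl, hh⟩
      · have : pvMax tl = 3 := by omega
        obtain ⟨kv, hm, hs⟩ := ih.mp this
        exact ⟨kv, Or.inr hm, hs⟩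
    · rintro ⟨kv, hm | hm, hs⟩
      · subst hm
        have := pvMax_le tl
        omega
      · have := ih.mpr ⟨kv, hm, hs⟩
        have := pvSev_bounds hd.1
        omega

theorem pvMax_ge2 (xs : List (String × List String)) :
    2 ≤ pvMax xs ↔ ∃ kv ∈ xs, 2 ≤ pvSev kv.1 := by
  induction xs with
  | nil => simp [pvMax]
  | cons hd tl ih =>
    rw [pvMax_cons]
    simp only [List.mem_cons]
    constructor
    · intro h
      by_cases hh : 2 ≤ pvSev hd.1
      · exact ⟨hd, Or.inl rfl, hh⟩
      · have : 2 ≤ pvMax tl := by omega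
        obtain ⟨kv, hm, hs⟩ := ih.mp this
        exact ⟨kv, Or.inr hm, hs⟩
    · rintro ⟨kv, hm | hm, hs⟩
      · subst hm; omega
      · have := ih.mpr ⟨kv, hm, hs⟩
        omega

theorem pvMax_pos (xs : List (String × List String)) (h : xs ≠ []) : 1 ≤ pvMax xs := by
  cases xs with
  | nil => exact absurd rfl h
  | cons hd tl =>
    rw [pvMax_cons]
    have := pvSev_bounds hd.1
    omega

-- A's crit-scan is true iff some key has severity 3
theorem pvCondC (findings : List (String × List String)) :
    (pvCritA.any (fun c => findings.any (fun kv => kv.1 == c)) = true)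
      ↔ ∃ kv ∈ findings, pvSev kv.1 = 3 := by
  simp only [List.any_eq_true, beq_iff_eq]
  constructor
  · rintro ⟨c, hc, kv, hkv, he⟩
    exact ⟨kv, hkv, (pvSev_eq3 kv.1).mpr (he ▸ hc)⟩
  · rintro ⟨kv, hkv, hs⟩
    exact ⟨kv.1, (pvSev_eq3 kv.1).mp hs, kv, hkv, rfl⟩

-- A's high-scan is true iff some key has severity 2
theorem pvCondH (findings : List (String × List String)) :
    (pvHighA.any (fun c => findings.any (fun kv => kv.1 == c)) = true)
      ↔ ∃ kv ∈ findings, pvSev kv.1 = 2 := by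
  simp only [List.any_eq_true, beq_iff_eq]
  constructor
  · rintro ⟨c, hc, kv, hkv, he⟩
    exact ⟨kv, hkv, (pvSev_eq2 kv.1).mpr (he ▸ hc)⟩
  · rintro ⟨kv, hkv, hs⟩
    exact ⟨kv.1, (pvSev_eq2 kv.1).mp hs, kv, hkv, rfl⟩

-- ===== VERDICT (by name: the statement is the Claim_ definition above) =====
theorem risk_level_py_spec : Claim_equal_risk_level_py := by
  intro findings _
  unfold Spec_risk_level_py risk_level_py risk_level_py_alt
  show _ = (if pvMax findings = 0 then "LOW" else if pvMax findings = 1 then "MEDIUM"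
    else if pvMax findings = 2 then "HIGH" else "CRITICAL")
  have hle := pvMax_le findings
  by_cases hC : ∃ kv ∈ findings, pvSev kv.1 = 3
  · have hm : pvMax findings = 3 := (pvMax_eq3 findings).mpr hC
    rw [if_pos ((pvCondC findings).mpr hC)]
    simp [hm]
  · have hm3 : pvMax findings ≠ 3 := fun h => hC ((pvMax_eq3 findings).mp h)
    rw [if_neg (fun h => hC ((pvCondC findings).mp h))]
    by_cases hH : ∃ kv ∈ findings, pvSev kv.1 = 2
    · have hge : 2 ≤ pvMax findings := by
        obtain ⟨kv, hm, hs⟩ := hH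
        exact (pvMax_ge2 findings).mpr ⟨kv, hm, by omega⟩
      have hm2 : pvMax findings = 2 := by omega
      rw [if_pos ((pvCondH findings).mpr hH)]
      simp [hm2]
    · have hlt : ¬ 2 ≤ pvMax findings := by
        intro h
        obtain ⟨kv, hm, hs⟩ := (pvMax_ge2 findings).mp h
        have hb := pvSev_bounds kv.1
        rcases Nat.lt_or_ge (pvSev kv.1) 3 with h3 | h3
        · exact hH ⟨kv, hm, by omega⟩
        · exact hC ⟨kv, hm, by omega⟩
      rw [if_neg (fun h => hH ((pvCondH findings).mp h))]
      by_cases hE : findings = []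
      · subst hE
        simp [pvMax]
      · have h1 : pvMax findings = 1 := by
          have := pvMax_pos findings hE
          omega
        rw [if_pos hE]
        simp [h1]
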